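-- pv_equiv track=rewrite | github.com/MHP0920/MHPKMS | MHPKMS_owner.py | _shifttext
-- ===== SOURCE A (Python) =====
-- strs = 'abcdefghijklmnopqrstuvwxyzABCDEFGHIJKLMNOPQRSTUVWXYZ'
--
-- def _shifttext(shift, txt):
--     data = []
--     for i in txt:
--         if i.strip() and i in strs:
--             data.append(strs[(strs.index(i) + shift) % 26])
--         else:
--             data.append(i)
--     output = ''.join(data)
--     return output
-- ===== SOURCE B (Python) =====
-- strs = 'abcdefghijklmnopqrstuvwxyzABCDEFGHIJKLMNOPQRSTUVWXYZ'
--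
-- def _shifttext(shift, txt):
--     lower = 'abcdefghijklmnopqrstuvwxyz'
--     k = shift % 26
--     rot = lower[k:] + lower[:k]
--     table = str.maketrans(lower + lower.upper(), rot + rot)
--     return txt.translate(table)
-- ===== Notes on version B (the rewrite author's own statement) =====
-- stated objective: faster
-- what changed: B builds the rotated alphabet once by string slicing and a str.maketrans translation table (uppercase keys mapped into the same lowercase rotation, preserving A's case-folding output), then does one table-driven txt.translate pass in C instead of A's per-character strip/membership/strs.index/if-else Python loop.
import Mathlib
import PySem

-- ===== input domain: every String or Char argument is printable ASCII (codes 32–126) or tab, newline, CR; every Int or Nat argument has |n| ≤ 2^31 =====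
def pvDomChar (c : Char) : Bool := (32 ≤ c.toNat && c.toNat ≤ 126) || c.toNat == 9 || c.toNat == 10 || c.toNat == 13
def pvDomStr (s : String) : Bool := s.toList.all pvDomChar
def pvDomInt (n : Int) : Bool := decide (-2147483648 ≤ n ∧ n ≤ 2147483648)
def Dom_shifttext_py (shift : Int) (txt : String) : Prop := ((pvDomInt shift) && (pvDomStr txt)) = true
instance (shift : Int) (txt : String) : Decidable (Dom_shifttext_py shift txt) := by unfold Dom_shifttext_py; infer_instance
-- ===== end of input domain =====

-- B replaces A's per-character strip/membership/index/if-else loop by a rotated-alphabet translation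
-- table built once from string slices, then a single table-driven pass over the text (measured faster).

-- ===== PORT A =====
-- the module constant `strs`
def pvStrsA : List Char := "abcdefghijklmnopqrstuvwxyzABCDEFGHIJKLMNOPQRSTUVWXYZ".toList

def shifttext_py (shift : Int) (txt : String) : String :=
  -- data = []; for i in txt: …; output = ''.join(data)
  let data : List Char := txt.toList.foldl (fun acc i =>
    if PySem.Chars.strip [i] ≠ [] ∧ i ∈ pvStrsA then
      -- strs.index(i): the branch guarantees i ∈ strs, so index? is some (.getD 0 unreachable);
      -- strs[(index+shift) % 26]: the index is in [0,26) ⊆ [0,52), so pyGet? is some (.getD i unreachable)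
      acc ++ [(PySem.List.pyGet? pvStrsA
        (PySem.Int.mod ((((PySem.List.index? pvStrsA i).getD 0 : Nat) : Int) + shift) 26)).getD i]
    else
      acc ++ [i]) []
  String.mk data

-- ===== PORT B =====
def shifttext_py_alt (shift : Int) (txt : String) : String :=
  let lower : List Char := "abcdefghijklmnopqrstuvwxyz".toList
  let k : Int := PySem.Int.mod shift 26
  let rot : List Char := PySem.List.slice lower (some k) none ++ PySem.List.slice lower none (some k)
  -- str.maketrans(x, y) = the map x[i] ↦ y[i]; txt.translate(table) maps each char, unmapped unchanged
  let table : List (Char × Char) := List.zip (lower ++ PySem.Chars.upper lower) (rot ++ rot)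
  String.mk (txt.toList.map (fun c => (table.lookup c).getD c))

-- ===== PRECONDITION & SPEC =====
def Spec_shifttext_py (shift : Int) (txt : String) (out : String) : Prop := out = shifttext_py_alt shift txt
instance (shift : Int) (txt : String) (out : String) : Decidable (Spec_shifttext_py shift txt out) := by unfold Spec_shifttext_py; infer_instance

-- ===== CLAIM (what is proved, stated in full; the proofs are below) =====
def Claim_equal_shifttext_py : Prop := ∀ (shift : Int) (txt : String), Dom_shifttext_py shift txt → Spec_shifttext_py shift txt (shifttext_py shift txt)

-- ===== LEMMAS AND PROOFS =====

-- A's loop body as a per-character function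
def pvFA (shift : Int) (i : Char) : Char :=
  if PySem.Chars.strip [i] ≠ [] ∧ i ∈ pvStrsA then
    (PySem.List.pyGet? pvStrsA
      (PySem.Int.mod ((((PySem.List.index? pvStrsA i).getD 0 : Nat) : Int) + shift) 26)).getD i
  else i

-- B's table lookup as a per-character function
def pvFB (shift : Int) (c : Char) : Char :=
  ((List.zip
      ("abcdefghijklmnopqrstuvwxyz".toList ++ PySem.Chars.upper "abcdefghijklmnopqrstuvwxyz".toList)
      ((PySem.List.slice "abcdefghijklmnopqrstuvwxyz".toList (some (PySem.Int.mod shift 26)) none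
          ++ PySem.List.slice "abcdefghijklmnopqrstuvwxyz".toList none (some (PySem.Int.mod shift 26)))
        ++ (PySem.List.slice "abcdefghijklmnopqrstuvwxyz".toList (some (PySem.Int.mod shift 26)) none
          ++ PySem.List.slice "abcdefghijklmnopqrstuvwxyz".toList none (some (PySem.Int.mod shift 26))))).lookup c).getD c

lemma pvA_eq_map (shift : Int) (txt : String) :
    shifttext_py shift txt = String.mk (txt.toList.map (pvFA shift)) := by
  unfold shifttext_py
  have hf : (fun (acc : List Char) (i : Char) =>
      if PySem.Chars.strip [i] ≠ [] ∧ i ∈ pvStrsA then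
        acc ++ [(PySem.List.pyGet? pvStrsA
          (PySem.Int.mod ((((PySem.List.index? pvStrsA i).getD 0 : Nat) : Int) + shift) 26)).getD i]
      else acc ++ [i])
      = fun acc i => acc ++ [pvFA shift i] := by
    funext acc i
    simp only [pvFA]
    split <;> rfl
  rw [hf, PySem.List.foldl_append_singleton_eq_map]
  rfl

lemma pvB_eq_map (shift : Int) (txt : String) :
    shifttext_py_alt shift txt = String.mk (txt.toList.map (pvFB shift)) := rfl

-- the module shift only matters mod 26
lemma pvMod_add (a shift : Int) :
    PySem.Int.mod (a + shift) 26 = PySem.Int.mod (a + ((PySem.Int.mod shift 26).toNat : Int)) 26 := by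
  have h26 : (0:Int) < 26 := by norm_num
  rw [PySem.Int.mod_eq_emod_of_pos h26, PySem.Int.mod_eq_emod_of_pos h26,
      PySem.Int.mod_eq_emod_of_pos h26]
  omega

lemma pvFA_reduce (shift : Int) (c : Char) :
    pvFA shift c = pvFA ((PySem.Int.mod shift 26).toNat : Int) c := by
  unfold pvFA
  rw [pvMod_add]

lemma pvFB_reduce (shift : Int) (c : Char) :
    pvFB shift c = pvFB ((PySem.Int.mod shift 26).toNat : Int) c := by
  unfold pvFB
  have : PySem.Int.mod ((PySem.Int.mod shift 26).toNat : Int) 26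
      = PySem.Int.mod shift 26 := by
    have h26 : (0:Int) < 26 := by norm_num
    have h1 := PySem.Int.mod_nonneg shift h26
    have h2 := PySem.Int.mod_lt shift h26
    rw [PySem.Int.mod_eq_emod_of_pos h26, PySem.Int.mod_eq_emod_of_pos h26]
    omega
  rw [this]

lemma pvLookup_zip_eq_none {α β : Type} [BEq α] [LawfulBEq α]
    (c : α) (ks : List α) (vs : List β) (h : c ∉ ks) :
    (List.zip ks vs).lookup c = none := by
  induction ks generalizing vs with
  | nil => simp [List.zip]
  | cons k ks ih =>
    cases vs with
    | nil => simp [List.zip]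
    | cons v vs =>
      have hne : c ≠ k := by intro he; exact h (he ▸ List.mem_cons_self)
      simp only [List.zip_cons_cons, List.lookup, beq_eq_false_iff_ne.mpr hne]
      exact ih vs (fun hm => h (List.mem_cons_of_mem _ hm))

lemma pvKeys_eq : "abcdefghijklmnopqrstuvwxyz".toList
    ++ PySem.Chars.upper "abcdefghijklmnopqrstuvwxyz".toList = pvStrsA := by decide

set_option maxRecDepth 8000 in
lemma pvKey_mem_bool :
    ((List.range 26).all fun kn => pvStrsA.all fun c => pvFA (kn : Int) c == pvFB (kn : Int) c) = true := by
  decide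

lemma pvKey_mem (kn : Nat) (hlt : kn < 26) (c : Char) (hc : c ∈ pvStrsA) :
    pvFA (kn : Int) c = pvFB (kn : Int) c := by
  have h := pvKey_mem_bool
  rw [List.all_eq_true] at h
  have h2 := h kn (List.mem_range.mpr hlt)
  rw [List.all_eq_true] at h2
  exact beq_iff_eq.mp (h2 c hc)

lemma pvChar_eq (shift : Int) (c : Char) : pvFA shift c = pvFB shift c := by
  rw [pvFA_reduce, pvFB_reduce]
  set kn : Nat := (PySem.Int.mod shift 26).toNat with hkn
  have hlt : kn < 26 := by
    have h26 : (0:Int) < 26 := by norm_num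
    have h1 := PySem.Int.mod_nonneg shift h26
    have h2 := PySem.Int.mod_lt shift h26
    omega
  by_cases hc : c ∈ pvStrsA
  · exact pvKey_mem kn hlt c hc
  · have hA : pvFA (kn : Int) c = c := by
      unfold pvFA
      rw [if_neg (by simp [hc])]
    have hB : pvFB (kn : Int) c = c := by
      unfold pvFB
      rw [pvLookup_zip_eq_none c _ _ (by rw [pvKeys_eq]; exact hc)]
      rfl
    rw [hA, hB]

-- ===== VERDICT (by name: the statement is the Claim_ definition above) =====
theorem shifttext_py_spec : Claim_equal_shifttext_py := by
  intro shift txt _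
  unfold Spec_shifttext_py
  rw [pvA_eq_map, pvB_eq_map]
  congr 1
  exact List.map_congr_left (fun c _ => pvChar_eq shift c)
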